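-- pv_equiv track=rewrite | github.com/basilkensington1-hash/kiin-content | src/strategy/content_planner.py | select_primary_keyword
-- ===== SOURCE A (Python) =====
-- from typing import Dict, List, Optional, Tuple, Set
--
-- def select_primary_keyword(topic: str, cluster_keywords: List[str]) -> str:
--     """Select the most appropriate primary keyword for content"""
--     topic_lower = topic.lower()
--
--     # Try to find exact match first
--     for keyword in cluster_keywords:
--         if keyword.lower() in topic_lower:
--             return keyword
--
--     # Find partial matches
--     for keyword in cluster_keywords:
--         keyword_words = keyword.lower().split()
--         if any(word in topic_lower for word in keyword_words):
--             return keyword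
--
--     # Fall back to first cluster keyword or topic itself
--     return cluster_keywords[0] if cluster_keywords else topic.lower()
-- ===== SOURCE B (Python) =====
-- def select_primary_keyword(topic, cluster_keywords):
--     """Select the most appropriate primary keyword for content"""
--     topic_lower = topic.lower()
--     first_partial = None
--     for keyword in cluster_keywords:
--         kw_lower = keyword.lower()
--         if kw_lower in topic_lower:
--             return keyword
--         if first_partial is None and any(word in topic_lower for word in kw_lower.split()):
--             first_partial = keyword
--     if first_partial is not None:
--         return first_partial
--     return cluster_keywords[0] if cluster_keywords else topic_lower
-- ===== Notes on version B (the rewrite author's own statement) =====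
-- stated objective: simpler
-- what changed: Single pass over cluster_keywords carrying the first partial-match candidate instead of A's two separate scans (exact-match scan, then partial-match scan).
import Mathlib
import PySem

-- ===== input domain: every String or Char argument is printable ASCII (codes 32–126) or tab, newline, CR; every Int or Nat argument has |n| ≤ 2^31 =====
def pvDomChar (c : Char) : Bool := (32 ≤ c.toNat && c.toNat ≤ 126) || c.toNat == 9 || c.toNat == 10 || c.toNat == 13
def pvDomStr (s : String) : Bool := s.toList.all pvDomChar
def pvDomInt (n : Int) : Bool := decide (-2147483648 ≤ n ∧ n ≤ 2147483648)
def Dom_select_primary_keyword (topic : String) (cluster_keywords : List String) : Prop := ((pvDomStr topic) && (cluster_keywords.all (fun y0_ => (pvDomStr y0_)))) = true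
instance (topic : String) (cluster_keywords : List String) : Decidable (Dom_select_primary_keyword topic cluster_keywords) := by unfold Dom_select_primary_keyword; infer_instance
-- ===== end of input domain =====

-- B does A's two scans (exact match, then partial match) in ONE pass that carries the
-- first partial-match candidate; objective: simpler (one traversal, same result).

-- ===== PORT A =====
-- exact-match test of A's first loop: keyword.lower() in topic_lower
def pvExact (tl k : String) : Bool := PySem.Str.isIn (PySem.Str.lower k) tl
-- partial-match test of A's second loop: any(word in topic_lower for word in keyword.lower().split())
def pvPartial (tl k : String) : Bool := (PySem.Str.split₀ (PySem.Str.lower k)).any (fun w => PySem.Str.isIn w tl)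

def select_primary_keyword (topic : String) (cluster_keywords : List String) : String :=
  let tl := PySem.Str.lower topic
  match cluster_keywords.find? (pvExact tl) with
  | some k => k
  | none =>
    match cluster_keywords.find? (pvPartial tl) with
    | some k => k
    | none => match cluster_keywords with
              | [] => tl
              | k :: _ => k

-- ===== PORT B =====
-- one pass: return on exact match, remember the first partial match in acc
def pvAltGo (tl fb : String) : List String → Option String → String
  | [], none => fb
  | [], some p => p
  | k :: rest, acc =>
    if pvExact tl k then k
    else pvAltGo tl fb rest (if acc.isNone && pvPartial tl k then some k else acc)

def select_primary_keyword_alt (topic : String) (cluster_keywords : List String) : String :=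
  let tl := PySem.Str.lower topic
  pvAltGo tl (cluster_keywords.headD tl) cluster_keywords none

-- ===== PRECONDITION & SPEC =====
def Spec_select_primary_keyword (topic : String) (cluster_keywords : List String) (out : String) : Prop := out = select_primary_keyword_alt topic cluster_keywords
instance (topic : String) (cluster_keywords : List String) (out : String) : Decidable (Spec_select_primary_keyword topic cluster_keywords out) := by unfold Spec_select_primary_keyword; infer_instance

-- ===== CLAIM (what is proved, stated in full; the proofs are below) =====
def Claim_equal_select_primary_keyword : Prop := ∀ (topic : String) (cluster_keywords : List String), Dom_select_primary_keyword topic cluster_keywords → Spec_select_primary_keyword topic cluster_keywords (select_primary_keyword topic cluster_keywords)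

-- ===== LEMMAS AND PROOFS =====
-- loop characterisation of B's single pass
theorem pvAltGo_eq (tl fb : String) (ks : List String) (acc : Option String) :
    pvAltGo tl fb ks acc =
      match ks.find? (pvExact tl) with
      | some k => k
      | none => ((acc.orElse (fun _ => ks.find? (pvPartial tl))).getD fb) := by
  induction ks generalizing acc with
  | nil => cases acc <;> simp [pvAltGo]
  | cons k rest ih =>
    by_cases he : pvExact tl k
    · simp [pvAltGo, he, List.find?]
    · simp only [pvAltGo, he, ih]
      cases acc with
      | some p => simp [List.find?_cons, he]
      | none =>
        by_cases hp : pvPartial tl k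
        · simp [he, hp]
        · simp [he, hp]

-- ===== VERDICT (by name: the statement is the Claim_ definition above) =====
theorem select_primary_keyword_spec : Claim_equal_select_primary_keyword := by
  intro topic ks _
  unfold Spec_select_primary_keyword select_primary_keyword select_primary_keyword_alt
  rw [pvAltGo_eq]
  cases hf : ks.find? (pvExact (PySem.Str.lower topic)) with
  | some k => simp [hf]
  | none =>
    cases hp : ks.find? (pvPartial (PySem.Str.lower topic)) with
    | some k => simp [hf, hp]
    | none => cases ks <;> simp [hf, hp]
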